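-- pv_equiv track=rewrite | github.com/aguscort/workflow-dirtlegal | code/Zap_1_1-step_3.py | order_type_by_sku
-- ===== SOURCE A (Python) =====
-- def order_type_by_sku(services, items):
--     #
--     # Define the Order Type
--     #
--     # Order type = Service if item sku = SQ7551020
--     # Order type = product if item name = ANYTHING ELSE
--     # Order type = combo if at least one item is a service and the other isn't a service as listed above.
--     service = False
--     product = False
--     item_type = ''
--     itemList = []
--     itemListRaw = items.split(",")  # Convert the string to a list
--     # Process raw list if any requirement should be made
--     itemList =  itemListRaw
--     for item in itemList: # Get all the items ordered by the customer
--         exit_loop = False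
--         i_product = False
--         i_service = False
--         for elem in services: # Perform a loop checking if it's a Service
--             if str(item) == str(elem):   # If the item contains the Service
--                 i_service = True        # we mark the item as Service
--                 i_product = False       # we mark the item as not a Product
--                 exit_loop = True        # we inform that we can leave the loop and go for the next item
--             else:
--                 if exit_loop == False:  # only if we should leave the loop
--                     i_product = True    # in that case the item is identified as a product
--         if i_product == True:           # The item has been categorized, we update the proper variable
--             product = True
--         elif i_service == True:
--             service = True
--     if service and product:             # If there is both kind of item
--         item_type = 'Combo'
--     elif service and not product:       # If there is only item that they are services
--         item_type = 'Service'
--     elif not service and product:       # If there is only item that they are products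
--         item_type = 'Product'
--     return itemList, item_type
-- ===== SOURCE B (Python) =====
-- def order_type_by_sku(services, items):
--     item_list = items.split(",")
--     svc = set(services)
--     present = set(item_list)
--     service = bool(present & svc)
--     product = bool(present - svc)
--     if service and product:
--         item_type = 'Combo'
--     elif service:
--         item_type = 'Service'
--     elif product:
--         item_type = 'Product'
--     else:
--         item_type = ''
--     return item_list, item_type
-- ===== Notes on version B (the rewrite author's own statement) =====
-- stated objective: simpler
-- what changed: Replaced the nested item-by-service scan with exit_loop/i_product/i_service flag juggling by set algebra: service = items-set intersects services-set, product = items-set minus services-set nonempty, then the same four-way cascade.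
-- intended difference: When services is the empty list A's inner loop never runs so no item is ever classified and A returns item_type '', while B returns 'Product', the intended value since every item is then 'anything else'. — e.g. on order_type_by_sku([], "x"): A returns (["x"], ""), B returns (["x"], "Product")
import Mathlib
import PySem

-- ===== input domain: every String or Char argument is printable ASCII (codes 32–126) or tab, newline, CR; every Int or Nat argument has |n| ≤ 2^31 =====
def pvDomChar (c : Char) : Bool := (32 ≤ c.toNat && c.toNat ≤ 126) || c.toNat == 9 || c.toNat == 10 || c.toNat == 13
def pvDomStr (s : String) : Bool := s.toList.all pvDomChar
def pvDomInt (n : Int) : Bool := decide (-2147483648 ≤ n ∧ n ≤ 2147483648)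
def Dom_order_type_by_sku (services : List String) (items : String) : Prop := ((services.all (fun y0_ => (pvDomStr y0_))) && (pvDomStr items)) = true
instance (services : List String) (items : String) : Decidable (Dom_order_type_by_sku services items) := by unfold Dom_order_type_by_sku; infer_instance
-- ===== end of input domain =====

-- B replaces A's nested item-by-service scan (with exit_loop/i_product/i_service flags) by set
-- algebra — intersection/difference of the item set with the service set — for simplicity;
-- on an empty services list B intentionally classifies the order as 'Product' where A returns ''.

-- ===== PORT A =====
-- inner loop over services; state = (exit_loop, i_product, i_service)
def pvInnerStep (item : String) (t : Bool × Bool × Bool) (elem : String) : Bool × Bool × Bool :=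
  if item == elem then (true, false, true)
  else if t.1 == false then (t.1, true, t.2.2) else t

-- one item of the outer loop; state = (service, product)
def pvOuterStep (services : List String) (st : Bool × Bool) (item : String) : Bool × Bool :=
  let r := services.foldl (pvInnerStep item) (false, false, false)
  if r.2.1 then (st.1, true) else if r.2.2 then (true, st.2) else st

def order_type_by_sku (services : List String) (items : String) : List String × String :=
  let itemListRaw := (PySem.Str.split? items ",").getD []
  let itemList := itemListRaw
  let sp := itemList.foldl (pvOuterStep services) (false, false)
  let item_type :=
    if sp.1 && sp.2 then "Combo"
    else if sp.1 && !sp.2 then "Service"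
    else if !sp.1 && sp.2 then "Product"
    else ""
  (itemList, item_type)

-- ===== PORT B =====
def order_type_by_sku_alt (services : List String) (items : String) : List String × String :=
  let item_list := (PySem.Str.split? items ",").getD []
  let svc : PySem.Set String := PySem.Set.ofList services
  let present : PySem.Set String := PySem.Set.ofList item_list
  let service := !(PySem.Set.inter present svc).isEmpty
  let product := !(PySem.Set.diff present svc).isEmpty
  let item_type :=
    if service && product then "Combo"
    else if service then "Service"
    else if product then "Product"
    else ""
  (item_list, item_type)

-- ===== PRECONDITION & SPEC =====
-- When services is the empty list A's inner loop never runs so no item is ever classified and A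
-- returns item_type '', while B returns 'Product', the intended value since every item is then
-- "anything else" (a product).
def D_order_type_by_sku (services : List String) (items : String) : Prop := services = []
instance (services : List String) (items : String) : Decidable (D_order_type_by_sku services items) := by unfold D_order_type_by_sku; infer_instance

def Spec_order_type_by_sku (services : List String) (items : String) (out : List String × String) : Prop := ¬ D_order_type_by_sku services items → out = order_type_by_sku_alt services items
instance (services : List String) (items : String) (out : List String × String) : Decidable (Spec_order_type_by_sku services items out) := by unfold Spec_order_type_by_sku; infer_instance

def pvDiffWitness_order_type_by_sku : List String × String := ([], "x")
def pvDiffWitnessOut_order_type_by_sku : (List String × String) × (List String × String) := ((["x"], ""), (["x"], "Product"))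

-- ===== CLAIM (what is proved, stated in full; the proofs are below) =====
def Claim_unchanged_order_type_by_sku : Prop := ∀ (services : List String) (items : String), Dom_order_type_by_sku services items → Spec_order_type_by_sku services items (order_type_by_sku services items)
def Claim_changed_order_type_by_sku : Prop := Dom_order_type_by_sku (pvDiffWitness_order_type_by_sku.1) (pvDiffWitness_order_type_by_sku.2) ∧ D_order_type_by_sku (pvDiffWitness_order_type_by_sku.1) (pvDiffWitness_order_type_by_sku.2) ∧ order_type_by_sku (pvDiffWitness_order_type_by_sku.1) (pvDiffWitness_order_type_by_sku.2) = pvDiffWitnessOut_order_type_by_sku.1 ∧ order_type_by_sku_alt (pvDiffWitness_order_type_by_sku.1) (pvDiffWitness_order_type_by_sku.2) = pvDiffWitnessOut_order_type_by_sku.2 ∧ pvDiffWitnessOut_order_type_by_sku.1 ≠ pvDiffWitnessOut_order_type_by_sku.2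
def Claim_exact_order_type_by_sku : Prop := ∀ (services : List String) (items : String), Dom_order_type_by_sku services items → D_order_type_by_sku services items → order_type_by_sku services items ≠ order_type_by_sku_alt services items

-- ===== LEMMAS AND PROOFS =====

-- A's inner loop, once a match flipped exit_loop, never changes state again
lemma inner_done (item : String) (l : List String) :
    l.foldl (pvInnerStep item) (true, false, true) = (true, false, true) := by
  induction l with
  | nil => rfl
  | cons e l ih => simp only [List.foldl_cons, pvInnerStep]; split <;> simpa

-- A's inner loop from the "seen a non-match" state
lemma inner_prod (item : String) (l : List String) :
    l.foldl (pvInnerStep item) (false, true, false) =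
      if item ∈ l then (true, false, true) else (false, true, false) := by
  induction l with
  | nil => rfl
  | cons e l ih =>
    simp only [List.foldl_cons, pvInnerStep, List.mem_cons]
    by_cases h : item = e
    · simp [h, inner_done]
    · simpa [h] using ih

-- full characterisation of A's inner loop
lemma inner_char (item : String) (l : List String) :
    l.foldl (pvInnerStep item) (false, false, false) =
      if item ∈ l then (true, false, true)
      else if l = [] then (false, false, false) else (false, true, false) := by
  cases l with
  | nil => rfl
  | cons e l =>
    simp only [List.foldl_cons, pvInnerStep, List.mem_cons]
    by_cases h : item = e
    · simp [h, inner_done]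
    · simp [h, inner_prod]

-- what one outer step does, in closed form
lemma outer_step_char (services : List String) (st : Bool × Bool) (item : String) :
    pvOuterStep services st item =
      if item ∈ services then (true, st.2)
      else if services = [] then st else (st.1, true) := by
  unfold pvOuterStep
  rw [inner_char]
  by_cases h : item ∈ services
  · simp [h]
  · by_cases he : services = [] <;> simp [h, he]

-- A's outer loop computes "some item is a service" / "services nonempty and some item is not"
lemma outer_fold (services : List String) (l : List String) (st : Bool × Bool) :
    l.foldl (pvOuterStep services) st =
      (st.1 || l.any (fun i => decide (i ∈ services)),
       st.2 || (!services.isEmpty && l.any (fun i => !decide (i ∈ services)))) := by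
  induction l generalizing st with
  | nil => simp
  | cons x xs ih =>
    rw [List.foldl_cons, outer_step_char, ih]
    by_cases h : x ∈ services
    · have hne : services.isEmpty = false := by
        cases services with
        | nil => simp at h
        | cons a l => rfl
      simp [h, hne]
    · by_cases he : services = []
      · subst he; simp [h]
      · have hne : services.isEmpty = false := by cases services with
          | nil => exact absurd rfl he
          | cons a l => rfl
        simp [h, he, hne]

-- B's intersection test = A's "some item is a service"
lemma inter_test (services raw : List String) :
    (!(PySem.Set.inter (PySem.Set.ofList raw) (PySem.Set.ofList services)).isEmpty) =
      raw.any (fun i => decide (i ∈ services)) := by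
  rw [Bool.eq_iff_iff]
  rw [Bool.not_eq_eq_eq_not, Bool.not_true, List.isEmpty_eq_false_iff_exists_mem]
  simp only [List.any_eq_true, decide_eq_true_eq]
  constructor
  · rintro ⟨x, hx⟩
    rw [PySem.Set.mem_inter _ _ _] at hx
    exact ⟨x, (PySem.Set.mem_ofList _ _).1 hx.1, (PySem.Set.mem_ofList _ _).1 hx.2⟩
  · rintro ⟨x, h1, h2⟩
    exact ⟨x, (PySem.Set.mem_inter _ _ _).2 ⟨(PySem.Set.mem_ofList _ _).2 h1, (PySem.Set.mem_ofList _ _).2 h2⟩⟩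

-- B's difference test = "some item is not a service"
lemma diff_test (services raw : List String) :
    (!(PySem.Set.diff (PySem.Set.ofList raw) (PySem.Set.ofList services)).isEmpty) =
      raw.any (fun i => !decide (i ∈ services)) := by
  rw [Bool.eq_iff_iff]
  rw [Bool.not_eq_eq_eq_not, Bool.not_true, List.isEmpty_eq_false_iff_exists_mem]
  simp only [List.any_eq_true, Bool.not_eq_eq_eq_not, Bool.not_true, decide_eq_false_iff_not]
  constructor
  · rintro ⟨x, hx⟩
    rw [PySem.Set.mem_diff _ _ _] at hx
    exact ⟨x, (PySem.Set.mem_ofList _ _).1 hx.1, fun hm => hx.2 ((PySem.Set.mem_ofList _ _).2 hm)⟩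
  · rintro ⟨x, h1, h2⟩
    exact ⟨x, (PySem.Set.mem_diff _ _ _).2 ⟨(PySem.Set.mem_ofList _ _).2 h1, fun hm => h2 ((PySem.Set.mem_ofList _ _).1 hm)⟩⟩

-- splitOn's worker always yields at least one piece
lemma go_ne (sep : List Char) : ∀ fuel l cur acc, PySem.Chars.splitOn.go sep fuel l cur acc ≠ [] := by
  intro fuel
  induction fuel with
  | zero => intro l cur acc; simp [PySem.Chars.splitOn.go]
  | succ n ih =>
    intro l cur acc
    cases l with
    | nil => simp [PySem.Chars.splitOn.go]
    | cons c rest =>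
      rw [PySem.Chars.splitOn.go]
      split
      · exact ih _ _ _
      · exact ih _ _ _

-- Python's s.split(",") is never the empty list
lemma split_ne (items : String) : (PySem.Str.split? items ",").getD [] ≠ [] := by
  simp [PySem.Str.split?, PySem.Chars.split?, PySem.Chars.splitOn]
  exact go_ne _ _ _ _ _

-- ===== VERDICT (by name: the statements are the Claim_ definitions above) =====
theorem order_type_by_sku_spec : Claim_unchanged_order_type_by_sku := by
  intro services items _ hD
  show _ = _
  unfold order_type_by_sku order_type_by_sku_alt
  have hne : services.isEmpty = false := by
    cases services with
    | nil => exact absurd rfl hD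
    | cons a l => rfl
  simp only [outer_fold, Bool.false_or, inter_test, diff_test, hne]
  generalize ((PySem.Str.split? items ",").getD []) = raw
  generalize (raw.any fun i => decide (i ∈ services)) = s
  generalize (raw.any fun i => !decide (i ∈ services)) = p
  cases s <;> cases p <;> rfl

theorem order_type_by_sku_changed : Claim_changed_order_type_by_sku := by
  unfold Claim_changed_order_type_by_sku; decide

theorem order_type_by_sku_tight : Claim_exact_order_type_by_sku := by
  intro services items _ hD
  subst hD
  unfold order_type_by_sku order_type_by_sku_alt
  simp only [outer_fold, Bool.false_or, inter_test, diff_test]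
  have hraw := split_ne items
  generalize hr : ((PySem.Str.split? items ",").getD []) = raw at hraw ⊢
  have h1 : (raw.any fun i => decide (i ∈ ([] : List String))) = false := by simp
  have h2 : (raw.any fun i => !decide (i ∈ ([] : List String))) = true := by
    cases raw with
    | nil => exact absurd rfl hraw
    | cons a l => simp
  intro h
  have := congrArg Prod.snd h
  simp at this
  cases raw with
  | nil => exact hraw rfl
  | cons a l => exact this a List.mem_cons_self
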